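-- pv_equiv track=rewrite | github.com/ericu/Genotyper | genotyper.py | phenotypeFromGenotype
-- ===== SOURCE A (Python) =====
-- def phenotypeFromGenotype(c):
--   if len(c) < 0 or len(c) % 2 != 0:
--     raise "Invalid chromosome length."
--   if len(c) == 0:
--     return ""
--   a0, a1, tail = c[0], c[1], c[2:]
--   if (a0.isupper()):
--     return a0 + phenotypeFromGenotype(tail)
--   return a1 + phenotypeFromGenotype(tail)
-- ===== SOURCE B (Python) =====
-- def phenotypeFromGenotype(c):
--   if len(c) % 2 != 0:
--     raise ValueError("Invalid chromosome length.")
--   out = []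
--   for i in range(0, len(c), 2):
--     a = c[i]
--     out.append(a if a.isupper() else c[i + 1])
--   return ''.join(out)
-- ===== Notes on version B (the rewrite author's own statement) =====
-- stated objective: faster
-- what changed: Replaces the tail recursion that rebuilds the result by repeated string concatenation with a single index loop over even positions accumulating characters into a list joined once; Pre_ excludes odd-length strings, on which A raises (a TypeError from a string raise).
import Mathlib
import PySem

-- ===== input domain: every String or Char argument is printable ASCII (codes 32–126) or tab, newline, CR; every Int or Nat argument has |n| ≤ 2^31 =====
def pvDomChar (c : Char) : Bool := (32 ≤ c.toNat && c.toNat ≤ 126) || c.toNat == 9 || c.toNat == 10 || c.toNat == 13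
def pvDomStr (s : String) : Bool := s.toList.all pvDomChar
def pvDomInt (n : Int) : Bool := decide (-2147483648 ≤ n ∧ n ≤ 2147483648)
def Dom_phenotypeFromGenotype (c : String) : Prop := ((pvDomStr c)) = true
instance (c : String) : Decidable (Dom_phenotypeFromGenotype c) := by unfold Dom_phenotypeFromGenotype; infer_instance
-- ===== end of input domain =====

-- B replaces A's tail recursion (quadratic string concatenation) with one index loop and a final join.

-- ===== PORT A =====
-- recursion on the character list, two characters at a time, exactly as A recurses on c[2:];
-- the one-element case is unreachable inside Pre_ (A raises on odd length)
def pvArec : List Char → List Char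
  | [] => []
  | [_] => []
  | a0 :: a1 :: tail =>
    if PySem.Chars.isupper a0 then a0 :: pvArec tail else a1 :: pvArec tail

def phenotypeFromGenotype (c : String) : String := String.mk (pvArec c.toList)

-- ===== PORT B =====
-- loop `for i in range(0, len(c), 2)` appending the dominant allele, then ''.join
def phenotypeFromGenotype_alt (c : String) : String :=
  let cs := c.toList
  let out := (PySem.List.pyRange 0 (cs.length : Int) 2).foldl
    (fun acc i =>
      let a := PySem.List.pyGetD cs i ' '
      acc ++ [if PySem.Chars.isupper a then a else PySem.List.pyGetD cs (i + 1) ' ']) []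
  String.mk out

-- ===== PRECONDITION & SPEC =====
-- Pre_ excludes odd-length strings: there A raises (a TypeError from `raise "…"`)
def Pre_phenotypeFromGenotype (c : String) : Prop := c.toList.length % 2 = 0
instance (c : String) : Decidable (Pre_phenotypeFromGenotype c) := by
  unfold Pre_phenotypeFromGenotype; infer_instance
def pvWitness_phenotypeFromGenotype : String := "AaBb"

def Spec_phenotypeFromGenotype (c : String) (out : String) : Prop := out = phenotypeFromGenotype_alt c
instance (c : String) (out : String) : Decidable (Spec_phenotypeFromGenotype c out) := by
  unfold Spec_phenotypeFromGenotype; infer_instance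

-- ===== CLAIM (what is proved, stated in full; the proofs are below) =====
def Claim_equal_phenotypeFromGenotype : Prop := ∀ (c : String), Dom_phenotypeFromGenotype c → Pre_phenotypeFromGenotype c → Spec_phenotypeFromGenotype c (phenotypeFromGenotype c)

-- ===== LEMMAS AND PROOFS =====

theorem pyRange_two_cons (a b : Int) (h : a < b) :
    PySem.List.pyRange a b 2 = a :: PySem.List.pyRange (a + 2) b 2 := by
  rw [PySem.List.pyRange_of_pos a b (by norm_num), PySem.List.pyRange_of_pos (a + 2) b (by norm_num)]
  have h1 : ((b - a + 2 - 1) / 2).toNat = (if a + 2 < b then ((b - (a + 2) + 2 - 1) / 2).toNat else 0) + 1 := by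
    split_ifs with h2 <;> omega
  rw [if_pos h, h1, List.range_succ_eq_map]
  simp [List.map_map, Function.comp_def]
  intro k _
  ring

theorem loop_step (a0 a1 : Char) (tail pre acc : List Char)
    (ih : ∀ (pre acc : List Char), tail.length % 2 = 0 →
      (PySem.List.pyRange (pre.length : Int) ((pre ++ tail).length : Int) 2).foldl
        (fun a i =>
          a ++ [if PySem.Chars.isupper (PySem.List.pyGetD (pre ++ tail) i ' ')
                then PySem.List.pyGetD (pre ++ tail) i ' '
                else PySem.List.pyGetD (pre ++ tail) (i + 1) ' ']) acc
      = acc ++ pvArec tail)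
    (hlen : (a0 :: a1 :: tail).length % 2 = 0) :
    (PySem.List.pyRange (pre.length : Int) ((pre ++ (a0 :: a1 :: tail)).length : Int) 2).foldl
      (fun a i =>
        a ++ [if PySem.Chars.isupper (PySem.List.pyGetD (pre ++ (a0 :: a1 :: tail)) i ' ')
              then PySem.List.pyGetD (pre ++ (a0 :: a1 :: tail)) i ' '
              else PySem.List.pyGetD (pre ++ (a0 :: a1 :: tail)) (i + 1) ' ']) acc
    = acc ++ pvArec (a0 :: a1 :: tail) := by
  have hlt : (pre.length : Int) < ((pre ++ (a0 :: a1 :: tail)).length : Int) := by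
    simp; omega
  rw [pyRange_two_cons _ _ hlt, List.foldl_cons]
  have hg0 : PySem.List.pyGetD (pre ++ (a0 :: a1 :: tail)) (pre.length : Int) ' ' = a0 := by
    rw [PySem.List.pyGetD_natCast]
    simp [List.getD_eq_getElem?_getD]
  have hg1 : PySem.List.pyGetD (pre ++ (a0 :: a1 :: tail)) ((pre.length : Int) + 1) ' ' = a1 := by
    have h2 : ((pre.length : Int) + 1) = ((pre.length + 1 : Nat) : Int) := by push_cast; ring
    rw [h2, PySem.List.pyGetD_natCast]
    simp [List.getD_eq_getElem?_getD]
  have hre : pre ++ (a0 :: a1 :: tail) = (pre ++ [a0, a1]) ++ tail := by simp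
  have hlen2 : (pre.length : Int) + 2 = (((pre ++ [a0, a1]).length : Nat) : Int) := by
    push_cast
    simp
  rw [hg0, hg1, hlen2, hre]
  rw [ih (pre ++ [a0, a1]) (acc ++ [if PySem.Chars.isupper a0 then a0 else a1])
      (by simp at hlen; omega)]
  simp only [pvArec, List.append_assoc, List.singleton_append]
  split_ifs <;> simp

theorem loop_eq (t : List Char) : ∀ (pre acc : List Char), t.length % 2 = 0 →
    (PySem.List.pyRange (pre.length : Int) ((pre ++ t).length : Int) 2).foldl
      (fun a i =>
        a ++ [if PySem.Chars.isupper (PySem.List.pyGetD (pre ++ t) i ' ')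
              then PySem.List.pyGetD (pre ++ t) i ' '
              else PySem.List.pyGetD (pre ++ t) (i + 1) ' ']) acc
    = acc ++ pvArec t := by
  induction t using pvArec.induct with
  | case1 =>
    intro pre acc _
    rw [List.append_nil, PySem.List.pyRange_of_pos _ _ (by norm_num : (0:Int) < 2)]
    simp [pvArec]
  | case2 a =>
    intro _ _ h; simp at h
  | case3 a0 a1 tail _ ih =>
    exact fun pre acc hlen => loop_step a0 a1 tail pre acc ih hlen
  | case4 a0 a1 tail _ ih =>
    exact fun pre acc hlen => loop_step a0 a1 tail pre acc ih hlen

-- ===== VERDICT (by name: the statement is the Claim_ definition above) =====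
theorem phenotypeFromGenotype_spec : Claim_equal_phenotypeFromGenotype := by
  intro c _ hpre
  unfold Spec_phenotypeFromGenotype phenotypeFromGenotype phenotypeFromGenotype_alt
  have h := loop_eq c.toList [] [] hpre
  simp only [List.nil_append, List.length_nil, Nat.cast_zero] at h
  exact congrArg String.mk h.symm
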